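-- pv_equiv track=rewrite | github.com/Bilyant/Algorythms-Python | 03. Introduction to graphs/09-task.py | calc_salary
-- ===== SOURCE A (Python) =====
-- def calc_salary(graph, node, salaries):
--     if salaries[node] is not None:
--         return salaries[node]
--     if len(graph[node]) == 0:
--         salaries[node] = 1
--         return 1
--
--     salary = 0
--     for employee in graph[node]:
--         salary += calc_salary(graph, employee, salaries)
--
--     salaries[node] = salary
--     return salary
-- ===== SOURCE B (Python) =====
-- def calc_salary(graph, node, salaries):
--     # Bottom-up fixed-point DP: repeatedly resolve every employee whose
--     # subordinates' salaries are all known, instead of recursing top-down.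
--     for _ in range(len(graph) + 1):
--         changed = False
--         for n, children in graph.items():
--             if n in salaries and salaries[n] is None:
--                 vals = [salaries.get(c) for c in children]
--                 if all(v is not None for v in vals):
--                     salaries[n] = sum(vals) if children else 1
--                     changed = True
--         if not changed:
--             break
--     return salaries[node]
-- ===== Notes on version B (the rewrite author's own statement) =====
-- stated objective: alternative
-- what changed: replaces the top-down memoized recursive DFS with an iterative bottom-up fixed-point: rounds over graph.items() resolve every employee whose subordinates' salaries are all already known, until nothing changes, then the node's entry is read off.
import Mathlib
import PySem

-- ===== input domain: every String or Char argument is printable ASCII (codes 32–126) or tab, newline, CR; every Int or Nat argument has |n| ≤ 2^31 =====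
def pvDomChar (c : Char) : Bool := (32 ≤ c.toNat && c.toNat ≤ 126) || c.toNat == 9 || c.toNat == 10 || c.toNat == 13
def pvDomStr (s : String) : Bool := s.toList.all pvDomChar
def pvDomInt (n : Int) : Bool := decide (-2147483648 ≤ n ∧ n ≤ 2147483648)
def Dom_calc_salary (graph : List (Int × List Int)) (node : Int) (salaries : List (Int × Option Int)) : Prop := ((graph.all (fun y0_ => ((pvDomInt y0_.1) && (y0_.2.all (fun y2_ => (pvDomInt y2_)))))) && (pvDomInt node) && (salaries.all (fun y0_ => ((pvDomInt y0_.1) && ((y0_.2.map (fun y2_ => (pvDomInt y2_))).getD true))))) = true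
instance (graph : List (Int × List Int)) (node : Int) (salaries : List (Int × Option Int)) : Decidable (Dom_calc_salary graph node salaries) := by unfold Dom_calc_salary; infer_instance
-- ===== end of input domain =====

-- B replaces A's top-down memoized recursion by a bottom-up fixed-point DP over all graph
-- entries (objective: alternative algorithm, similar cost).  Both Pythons mutate `salaries`;
-- the equivalence proved here is about the RETURN value only (B may fill in entries of
-- `salaries` for resolvable employees that A's DFS never visits).

-- ===== PORT A =====
-- A's recursion has no bound in Python (a cycle means RecursionError); the port carries a
-- fuel counter, decremented at every call, as a totalization guard only: depth graph.length+1
-- is enough whenever the Python returns (acyclic region of distinct keys), and `none` marks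
-- exactly the inputs where the Python raises or recurses forever (all outside Pre_).
mutual
def calcA (g : PySem.Dict Int (List Int)) : Nat → Int → PySem.Dict Int (Option Int) → Option (Int × PySem.Dict Int (Option Int))
  | 0, _, _ => none
  | f+1, n, d =>
    match PySem.Dict.get? d n with
    | none => none                                   -- salaries[node] : KeyError
    | some (some v) => some (v, d)                   -- if salaries[node] is not None: return it
    | some none =>
      match PySem.Dict.get? g n with
      | none => none                                 -- graph[node] : KeyError
      | some children =>
        if children.isEmpty then
          some (1, PySem.Dict.insert d n (some 1))   -- salaries[node] = 1; return 1
        else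
          match calcAFold g f children 0 d with      -- salary = 0; for employee in graph[node]: …
          | none => none
          | some (sal, d') => some (sal, PySem.Dict.insert d' n (some sal))
  termination_by f _ _ => (f, 0)

-- the `for employee in graph[node]: salary += calc_salary(graph, employee, salaries)` loop
def calcAFold (g : PySem.Dict Int (List Int)) : Nat → List Int → Int → PySem.Dict Int (Option Int) → Option (Int × PySem.Dict Int (Option Int))
  | _, [], acc, d => some (acc, d)
  | f, c :: cs, acc, d =>
    match calcA g f c d with
    | none => none
    | some (v, d1) => calcAFold g f cs (acc + v) d1
  termination_by f cs _ _ => (f, cs.length + 1)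
end

def calc_salary (graph : List (Int × List Int)) (node : Int) (salaries : List (Int × Option Int)) : Int :=
  match calcA (PySem.Dict.mk graph) (graph.length + 1) node (PySem.Dict.mk salaries) with
  | some (v, _) => v
  | none => 0

-- ===== PORT B =====
-- one graph.items() pass: resolve every listed employee whose subordinates' salaries are known
def dpStep (st : PySem.Dict Int (Option Int) × Bool) (p : Int × List Int) : PySem.Dict Int (Option Int) × Bool :=
  match PySem.Dict.get? st.1 p.1 with
  | some none =>                                     -- n in salaries and salaries[n] is None
    let vals := p.2.map (fun c => (PySem.Dict.get? st.1 c).join)   -- [salaries.get(c) for c in children]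
    if vals.all Option.isSome then
      (PySem.Dict.insert st.1 p.1
        (some (if p.2.isEmpty then 1 else vals.foldl (fun a v => a + v.getD 0) 0)), true)
    else st
  | _ => st

def dpRound (gl : List (Int × List Int)) (d : PySem.Dict Int (Option Int)) : PySem.Dict Int (Option Int) × Bool :=
  gl.foldl dpStep (d, false)

def dpLoop (gl : List (Int × List Int)) : Nat → PySem.Dict Int (Option Int) → PySem.Dict Int (Option Int)
  | 0, d => d
  | r+1, d =>
    match dpRound gl d with
    | (d', true) => dpLoop gl r d'
    | (d', false) => d'                              -- if not changed: break

def calc_salary_alt (graph : List (Int × List Int)) (node : Int) (salaries : List (Int × Option Int)) : Int :=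
  match PySem.Dict.get? (dpLoop graph (graph.length + 1) (PySem.Dict.mk salaries)) node with
  | some (some v) => v
  | _ => 0                                           -- salaries[node] missing/None: Python raises/returns None (outside Pre_)

-- ===== PRECONDITION & SPEC =====
-- Pre_ = exactly the inputs where the Python A returns: every node the DFS touches (the
-- memo-stopped reachable set of `node`) has a salaries entry, has a graph entry when its memo
-- is None, and no memo-None touched node can reach itself (a cycle = RecursionError).
-- The Nodup conjunct on graph keys only states that `graph` comes from a Python dict
-- (duplicate keys are impossible for dict inputs, so it excludes no Python input).
def pvReachStep (gd : PySem.Dict Int (List Int)) (sd : PySem.Dict Int (Option Int)) (R : List Int) : List Int :=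
  R ++ (((R.filter (fun k => decide (PySem.Dict.get? sd k = some none))).flatMap
          (fun k => (PySem.Dict.get? gd k).getD [])).filter (fun c => decide (c ∉ R))).dedup

def pvReach (gd : PySem.Dict Int (List Int)) (sd : PySem.Dict Int (Option Int)) (N : Nat) (start : List Int) : List Int :=
  (pvReachStep gd sd)^[N] start

def Pre_calc_salary (graph : List (Int × List Int)) (node : Int) (salaries : List (Int × Option Int)) : Prop :=
  (graph.map Prod.fst).Nodup ∧
  (∀ k ∈ pvReach (PySem.Dict.mk graph) (PySem.Dict.mk salaries)
          (graph.length + (graph.map (fun p => p.2.length)).sum + 1) [node],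
     PySem.Dict.get? (PySem.Dict.mk salaries) k ≠ none ∧
     (PySem.Dict.get? (PySem.Dict.mk salaries) k = some none →
       PySem.Dict.get? (PySem.Dict.mk graph) k ≠ none ∧
       k ∉ pvReach (PySem.Dict.mk graph) (PySem.Dict.mk salaries)
             (graph.length + (graph.map (fun p => p.2.length)).sum + 1)
             ((PySem.Dict.get? (PySem.Dict.mk graph) k).getD [])))

instance (graph : List (Int × List Int)) (node : Int) (salaries : List (Int × Option Int)) : Decidable (Pre_calc_salary graph node salaries) := by unfold Pre_calc_salary; infer_instance

def pvWitness_calc_salary : (List (Int × List Int)) × Int × (List (Int × Option Int)) :=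
  ([(1, [2, 3]), (2, []), (3, [])], 1, [(1, none), (2, none), (3, some 4)])

def Spec_calc_salary (graph : List (Int × List Int)) (node : Int) (salaries : List (Int × Option Int)) (out : Int) : Prop := out = calc_salary_alt graph node salaries
instance (graph : List (Int × List Int)) (node : Int) (salaries : List (Int × Option Int)) (out : Int) : Decidable (Spec_calc_salary graph node salaries out) := by unfold Spec_calc_salary; infer_instance

-- ===== CLAIM (what is proved, stated in full; the proofs are below) =====
def Claim_equal_calc_salary : Prop := ∀ (graph : List (Int × List Int)) (node : Int) (salaries : List (Int × Option Int)), Dom_calc_salary graph node salaries → Pre_calc_salary graph node salaries → Spec_calc_salary graph node salaries (calc_salary graph node salaries)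

-- ===== LEMMAS AND PROOFS =====

theorem pvWitness_ok : Dom_calc_salary (pvWitness_calc_salary.1) (pvWitness_calc_salary.2.1) (pvWitness_calc_salary.2.2) ∧ Pre_calc_salary (pvWitness_calc_salary.1) (pvWitness_calc_salary.2.1) (pvWitness_calc_salary.2.2) := by
  constructor <;> decide


-- ---- spec-side pure valuation: the (unique) salary value determined by graph and the
-- ---- ORIGINAL salaries dict, fuel-bounded (none = undetermined within that depth)

def osum (F : Int → Option Int) (ch : List Int) (a : Option Int) : Option Int :=
  ch.foldl (fun a c =>
    match a with
    | none => none
    | some acc =>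
      match F c with
      | none => none
      | some v => some (acc + v)) a

def pv (g : PySem.Dict Int (List Int)) (s0 : PySem.Dict Int (Option Int)) : Nat → Int → Option Int
  | 0, _ => none
  | f+1, n =>
    match PySem.Dict.get? s0 n with
    | none => none
    | some (some v) => some v
    | some none =>
      match PySem.Dict.get? g n with
      | none => none
      | some ch => if ch.isEmpty then some 1 else osum (pv g s0 f) ch (some 0)

theorem osum_nil (F : Int → Option Int) (a : Option Int) : osum F [] a = a := rfl

theorem osum_none (F : Int → Option Int) : ∀ ch : List Int, osum F ch none = none := by
  intro ch; induction ch with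
  | nil => rfl
  | cons c cs ih => simpa [osum, List.foldl] using ih

theorem osum_cons_some {F : Int → Option Int} {c : Int} {v : Int} (h : F c = some v)
    (cs : List Int) (acc : Int) : osum F (c :: cs) (some acc) = osum F cs (some (acc + v)) := by
  simp [osum, List.foldl, h]

theorem osum_cons_none {F : Int → Option Int} {c : Int} (h : F c = none)
    (cs : List Int) (acc : Int) : osum F (c :: cs) (some acc) = none := by
  simp only [osum, List.foldl, h]
  exact osum_none F cs

theorem osum_mono {F F' : Int → Option Int} : ∀ (ch : List Int) (acc t : Int),
    (∀ c ∈ ch, ∀ v, F c = some v → F' c = some v) →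
    osum F ch (some acc) = some t → osum F' ch (some acc) = some t := by
  intro ch; induction ch with
  | nil => intro acc t _ h; simpa [osum_nil] using h
  | cons c cs ih =>
    intro acc t hF h
    cases hc : F c with
    | none => rw [osum_cons_none hc] at h; exact absurd h (by simp)
    | some v =>
      rw [osum_cons_some hc] at h
      rw [osum_cons_some (hF c (by simp) v hc)]
      exact ih _ _ (fun c' hc' => hF c' (by simp [hc'])) h

theorem osum_elim {F : Int → Option Int} : ∀ (ch : List Int) (acc t : Int),
    osum F ch (some acc) = some t → ∀ c ∈ ch, ∃ v, F c = some v := by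
  intro ch; induction ch with
  | nil => intro _ _ _ c hc; cases hc
  | cons c cs ih =>
    intro acc t h c' hc'
    cases hc : F c with
    | none => rw [osum_cons_none hc] at h; exact absurd h (by simp)
    | some v =>
      rcases List.mem_cons.mp hc' with rfl | hmem
      · exact ⟨v, hc⟩
      · exact ih _ _ (by rwa [osum_cons_some hc] at h) c' hmem

theorem osum_of_vals {F : Int → Option Int} {val : Int → Int} : ∀ (ch : List Int) (acc : Int),
    (∀ c ∈ ch, F c = some (val c)) →
    osum F ch (some acc) = some (ch.foldl (fun a c => a + val c) acc) := by
  intro ch; induction ch with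
  | nil => intro acc _; rfl
  | cons c cs ih =>
    intro acc h
    rw [osum_cons_some (h c (by simp)), List.foldl_cons]
    exact ih _ (fun c' hc' => h c' (by simp [hc']))

theorem pv_mono (g : PySem.Dict Int (List Int)) (s0 : PySem.Dict Int (Option Int)) :
    ∀ (f f' : Nat), f ≤ f' → ∀ n v, pv g s0 f n = some v → pv g s0 f' n = some v := by
  intro f
  induction f with
  | zero => intro f' _ n v h; simp [pv] at h
  | succ f ih =>
    intro f' hle n v h
    obtain ⟨f1, rfl⟩ : ∃ f1, f' = f1 + 1 := ⟨f' - 1, by omega⟩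
    simp only [pv] at h ⊢
    cases hs : PySem.Dict.get? s0 n with
    | none => simp [hs] at h
    | some o =>
      cases o with
      | some v0 => simpa [hs] using (by simpa [hs] using h)
      | none =>
        simp only [hs] at h ⊢
        cases hg : PySem.Dict.get? g n with
        | none => simp [hg] at h
        | some ch =>
          simp only [hg] at h ⊢
          by_cases he : ch.isEmpty
          · simpa [he] using (by simpa [he] using h)
          · simp only [he] at h ⊢
            exact osum_mono ch 0 v (fun c _ w hw => ih f1 (by omega) c w hw) h

theorem pv_det (g : PySem.Dict Int (List Int)) (s0 : PySem.Dict Int (Option Int))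
    {f f' : Nat} {n v v' : Int} (h : pv g s0 f n = some v) (h' : pv g s0 f' n = some v') :
    v = v' := by
  have h1 := pv_mono g s0 f (max f f') (le_max_left _ _) n v h
  have h2 := pv_mono g s0 f' (max f f') (le_max_right _ _) n v' h'
  rw [h1] at h2; exact Option.some.inj h2

-- ---- resolved-entry counting over the graph's keys

def isRes (d : PySem.Dict Int (Option Int)) (k : Int) : Bool :=
  match PySem.Dict.get? d k with
  | some (some _) => true
  | _ => false

def rc (gl : List (Int × List Int)) (d : PySem.Dict Int (Option Int)) : Nat :=
  ((gl.map Prod.fst).filter (isRes d)).length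

def ResMono (d d' : PySem.Dict Int (Option Int)) : Prop :=
  ∀ k (w : Int), PySem.Dict.get? d k = some (some w) → PySem.Dict.get? d' k = some (some w)

theorem resMono_refl (d : PySem.Dict Int (Option Int)) : ResMono d d := fun _ _ h => h

theorem resMono_trans {d1 d2 d3 : PySem.Dict Int (Option Int)}
    (h1 : ResMono d1 d2) (h2 : ResMono d2 d3) : ResMono d1 d3 :=
  fun k w h => h2 k w (h1 k w h)

theorem rc_le (gl : List (Int × List Int)) (d : PySem.Dict Int (Option Int)) :
    rc gl d ≤ gl.length := by
  have := List.length_filter_le (isRes d) (gl.map Prod.fst)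
  simpa [rc] using this

theorem rc_congr (gl : List (Int × List Int)) {d d' : PySem.Dict Int (Option Int)}
    (h : ∀ k, isRes d' k = isRes d k) : rc gl d' = rc gl d := by
  unfold rc; rw [List.filter_congr (fun k _ => h k)]

theorem isRes_insert_self (d : PySem.Dict Int (Option Int)) (n : Int) (w : Int) :
    isRes (PySem.Dict.insert d n (some w)) n = true := by
  simp [isRes, PySem.Dict.get?_insert_self]

theorem get?_insert_ne' (d : PySem.Dict Int (Option Int)) {k n : Int} (h : k ≠ n) (v : Option Int) :
    PySem.Dict.get? (PySem.Dict.insert d n v) k = PySem.Dict.get? d k :=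
  PySem.Dict.get?_insert_of_ne d v h

theorem isRes_insert_ne (d : PySem.Dict Int (Option Int)) {k n : Int} (h : k ≠ n) (w : Int) :
    isRes (PySem.Dict.insert d n (some w)) k = isRes d k := by
  simp [isRes, get?_insert_ne' d h]

theorem rc_insert_succ_aux (d : PySem.Dict Int (Option Int)) (n : Int) (w : Int)
    (hres : isRes d n = false) :
    ∀ l : List Int, n ∈ l →
      (l.filter (isRes d)).length + 1 ≤ (l.filter (isRes (PySem.Dict.insert d n (some w)))).length := by
  have hmono : ∀ a, isRes d a = true → isRes (PySem.Dict.insert d n (some w)) a = true := by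
    intro a ha
    by_cases hax : a = n
    · subst hax; exact isRes_insert_self d a w
    · rwa [isRes_insert_ne d hax]
  intro l
  induction l with
  | nil => intro h; cases h
  | cons x t ih =>
    intro hmem
    by_cases hx : x = n
    · subst hx
      have hle := (List.monotone_filter_right t hmono).length_le
      simp only [List.filter_cons, hres, isRes_insert_self d x w, if_false, if_true,
        Bool.false_eq_true, List.length_cons]
      omega
    · have hxr : isRes (PySem.Dict.insert d n (some w)) x = isRes d x := isRes_insert_ne d hx w
      have hmem' : n ∈ t := by
        rcases List.mem_cons.mp hmem with h | h
        · exact absurd h.symm hx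
        · exact h
      cases hb : isRes d x with
      | true => simp only [List.filter_cons, hb, hxr, if_true, List.length_cons]; have := ih hmem'; omega
      | false => simp only [List.filter_cons, hb, hxr, Bool.false_eq_true, if_false]; exact ih hmem'

theorem rc_insert_succ (gl : List (Int × List Int)) (d : PySem.Dict Int (Option Int))
    {n : Int} (w : Int) (hmem : n ∈ gl.map Prod.fst) (hres : isRes d n = false) :
    rc gl d + 1 ≤ rc gl (PySem.Dict.insert d n (some w)) :=
  rc_insert_succ_aux d n w hres (gl.map Prod.fst) hmem


-- ---- dict-of-list access lemmas

theorem get?_mk_mem {v : Type} : ∀ (gl : List (Int × v)) (n : Int) (ch : v),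
    PySem.Dict.get? (PySem.Dict.mk gl) n = some ch → (n, ch) ∈ gl := by
  intro gl
  induction gl with
  | nil => intro n ch h; simp [PySem.Dict.get?] at h
  | cons p t ih =>
    intro n ch h
    rw [show (p : Int × v) = (p.1, p.2) from rfl, PySem.Dict.get?_mk_cons] at h
    by_cases hp : p.1 = n
    · simp only [hp, beq_self_eq_true, if_true] at h
      obtain rfl : ch = p.2 := (Option.some.inj h).symm
      subst hp
      exact List.mem_cons_self
    · simp only [beq_eq_false_iff_ne.mpr hp, Bool.false_eq_true, if_false] at h
      right
      exact ih n ch h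

theorem mem_keys_of_get? {v : Type} (gl : List (Int × v)) (n : Int) (ch : v)
    (h : PySem.Dict.get? (PySem.Dict.mk gl) n = some ch) : n ∈ gl.map Prod.fst := by
  have := get?_mk_mem gl n ch h
  exact List.mem_map.mpr ⟨(n, ch), this, rfl⟩

theorem get?_of_pair_nodup {v : Type} : ∀ (gl : List (Int × v)), (gl.map Prod.fst).Nodup →
    ∀ (n : Int) (ch : v), (n, ch) ∈ gl → PySem.Dict.get? (PySem.Dict.mk gl) n = some ch := by
  intro gl
  induction gl with
  | nil => intro _ n ch h; cases h
  | cons p t ih =>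
    intro hnd n ch hmem
    rw [show (p : Int × v) = (p.1, p.2) from rfl, PySem.Dict.get?_mk_cons]
    rcases List.mem_cons.mp hmem with rfl | hmem'
    · simp
    · have hne : p.1 ≠ n := by
        intro he
        have : n ∈ t.map Prod.fst := List.mem_map.mpr ⟨(n, ch), hmem', rfl⟩
        rw [List.map_cons, List.nodup_cons, he] at hnd
        exact hnd.1 this
      simp only [beq_eq_false_iff_ne.mpr hne, Bool.false_eq_true, if_false]
      exact ih (by rw [List.map_cons, List.nodup_cons] at hnd; exact hnd.2) n ch hmem'

-- ---- the state invariant shared by both ports: every memo entry of the evolving dict is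
-- ---- correct for the pure valuation pv over the ORIGINAL dict, with fuel the number of
-- ---- resolved graph keys (+1)

def GInv (gl : List (Int × List Int)) (s0 d : PySem.Dict Int (Option Int)) : Prop :=
  (∀ k, PySem.Dict.get? d k = some none → PySem.Dict.get? s0 k = some none) ∧
  (∀ k, (PySem.Dict.get? d k = none ↔ PySem.Dict.get? s0 k = none)) ∧
  (∀ k v, PySem.Dict.get? d k = some (some v) →
    pv (PySem.Dict.mk gl) s0 (rc gl d + 1) k = some v)

theorem GInv_init (gl : List (Int × List Int)) (s0 : PySem.Dict Int (Option Int)) :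
    GInv gl s0 s0 := by
  refine ⟨fun _ h => h, fun _ => Iff.rfl, fun k v h => ?_⟩
  simp [pv, h]

theorem GInv_write (gl : List (Int × List Int)) (s0 d : PySem.Dict Int (Option Int))
    {n : Int} {w : Int} (hInv : GInv gl s0 d) (hn : PySem.Dict.get? d n = some none)
    (hmem : n ∈ gl.map Prod.fst)
    (hval : pv (PySem.Dict.mk gl) s0 (rc gl d + 2) n = some w) :
    GInv gl s0 (PySem.Dict.insert d n (some w)) := by
  obtain ⟨h1, h2, h3⟩ := hInv
  have hres : isRes d n = false := by simp [isRes, hn]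
  have hrc : rc gl d + 2 ≤ rc gl (PySem.Dict.insert d n (some w)) + 1 := by
    have := rc_insert_succ gl d w hmem hres; omega
  refine ⟨fun k hk => ?_, fun k => ?_, fun k v hk => ?_⟩
  · by_cases hkn : k = n
    · subst hkn; rw [PySem.Dict.get?_insert_self] at hk; cases hk
    · exact h1 k (by rwa [get?_insert_ne' d hkn] at hk)
  · by_cases hkn : k = n
    · subst hkn
      rw [PySem.Dict.get?_insert_self]
      constructor
      · intro h; cases h
      · intro h; rw [h1 k hn] at h; cases h
    · rw [get?_insert_ne' d hkn]; exact h2 k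
  · by_cases hkn : k = n
    · subst hkn
      rw [PySem.Dict.get?_insert_self] at hk
      have : w = v := by injection (Option.some.inj hk)
      subst this
      exact pv_mono _ _ _ _ hrc k w hval
    · rw [get?_insert_ne' d hkn] at hk
      exact pv_mono _ _ _ _ (by omega : rc gl d + 1 ≤ rc gl (PySem.Dict.insert d n (some w)) + 1) k v (h3 k v hk)

theorem GInv_rewrite (gl : List (Int × List Int)) (s0 d : PySem.Dict Int (Option Int))
    {n : Int} {w w' : Int} {F : Nat} (hInv : GInv gl s0 d)
    (hn : PySem.Dict.get? d n = some (some w'))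
    (hval : pv (PySem.Dict.mk gl) s0 F n = some w) :
    GInv gl s0 (PySem.Dict.insert d n (some w)) := by
  have hw : w' = w := pv_det _ _ (hInv.2.2 n w' hn) hval
  subst hw
  have hpt : ∀ k, PySem.Dict.get? (PySem.Dict.insert d n (some w')) k = PySem.Dict.get? d k := by
    intro k
    by_cases hkn : k = n
    · subst hkn; rw [PySem.Dict.get?_insert_self, hn]
    · exact get?_insert_ne' d hkn _
  have hrc : rc gl (PySem.Dict.insert d n (some w')) = rc gl d :=
    rc_congr gl (fun k => by simp [isRes, hpt k])
  obtain ⟨h1, h2, h3⟩ := hInv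
  refine ⟨fun k hk => h1 k (by rwa [hpt k] at hk), fun k => by rw [hpt k]; exact h2 k,
    fun k v hk => ?_⟩
  rw [hrc]
  exact h3 k v (by rwa [hpt k] at hk)

theorem resMono_insert (d : PySem.Dict Int (Option Int)) {n : Int} (w : Int)
    (hn : ∀ w', PySem.Dict.get? d n ≠ some (some w')) :
    ResMono d (PySem.Dict.insert d n (some w)) := by
  intro k v hk
  by_cases hkn : k = n
  · subst hkn; exact absurd hk (hn v)
  · rwa [get?_insert_ne' d hkn]


-- ---- port A agrees with pv (soundness: any returned value is the pv value; the memo stays correct)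

theorem A_sound (gl : List (Int × List Int)) (s0 : PySem.Dict Int (Option Int)) : ∀ f : Nat,
    (∀ n d v d', GInv gl s0 d → calcA (PySem.Dict.mk gl) f n d = some (v, d') →
       GInv gl s0 d' ∧ PySem.Dict.get? d' n = some (some v) ∧ ResMono d d') ∧
    (∀ cs acc d t d', GInv gl s0 d → calcAFold (PySem.Dict.mk gl) f cs acc d = some (t, d') →
       GInv gl s0 d' ∧ ResMono d d' ∧
       osum (pv (PySem.Dict.mk gl) s0 (rc gl d' + 1)) cs (some acc) = some t) := by
  intro f
  induction f with
  | zero =>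
    constructor
    · intro n d v d' _ h; rw [calcA] at h; cases h
    · intro cs acc d t d' hInv h
      cases cs with
      | nil =>
        rw [calcAFold] at h
        have := Option.some.inj h
        obtain ⟨rfl, rfl⟩ : acc = t ∧ d = d' := ⟨congrArg Prod.fst this, congrArg Prod.snd this⟩
        exact ⟨hInv, resMono_refl d, rfl⟩
      | cons c cs => rw [calcAFold, calcA] at h; cases h
  | succ f ih =>
    have hA : ∀ n d v d', GInv gl s0 d → calcA (PySem.Dict.mk gl) (f+1) n d = some (v, d') →
        GInv gl s0 d' ∧ PySem.Dict.get? d' n = some (some v) ∧ ResMono d d' := by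
      intro n d v d' hInv h
      rw [calcA] at h
      split at h
      · cases h
      · -- memo hit
        next v0 hdn =>
        have := Option.some.inj h
        obtain ⟨rfl, rfl⟩ : v0 = v ∧ d = d' := ⟨congrArg Prod.fst this, congrArg Prod.snd this⟩
        exact ⟨hInv, hdn, resMono_refl d⟩
      · next hdn =>
        have hs0n : PySem.Dict.get? s0 n = some none := hInv.1 n hdn
        split at h
        · cases h
        · next ch hgn =>
          have hmem : n ∈ gl.map Prod.fst := mem_keys_of_get? gl n ch hgn
          split at h
          · -- leaf
            next he =>
            have := Option.some.inj h
            obtain ⟨rfl, rfl⟩ : (1:Int) = v ∧ PySem.Dict.insert d n (some 1) = d' :=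
              ⟨congrArg Prod.fst this, congrArg Prod.snd this⟩
            have hval : pv (PySem.Dict.mk gl) s0 (rc gl d + 2) n = some 1 := by
              simp [pv, hs0n, hgn, he]
            refine ⟨GInv_write gl s0 d hInv hdn hmem hval, PySem.Dict.get?_insert_self .., ?_⟩
            exact resMono_insert d 1 (fun w' hw' => by rw [hdn] at hw'; cases hw')
          · next he =>
            split at h
            · cases h
            · next sal d'' hfold =>
              have := Option.some.inj h
              obtain ⟨rfl, rfl⟩ : sal = v ∧ PySem.Dict.insert d'' n (some sal) = d' :=
                ⟨congrArg Prod.fst this, congrArg Prod.snd this⟩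
              obtain ⟨hInv'', hMono'', hosum⟩ := ih.2 ch 0 d sal d'' hInv hfold
              have hval : pv (PySem.Dict.mk gl) s0 (rc gl d'' + 2) n = some sal := by
                simp only [pv, hs0n, hgn, if_neg he]
                exact hosum
              cases hdn'' : PySem.Dict.get? d'' n with
              | none =>
                exfalso
                have := (hInv''.2.1 n).mp hdn''
                rw [this] at hs0n; cases hs0n
              | some o'' =>
                cases o'' with
                | none =>
                  refine ⟨GInv_write gl s0 d'' hInv'' hdn'' hmem hval,
                    PySem.Dict.get?_insert_self .., ?_⟩
                  refine resMono_trans hMono'' (resMono_insert d'' sal ?_)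
                  intro w' hw'; rw [hdn''] at hw'; cases hw'
                | some w =>
                  have hw : w = sal := pv_det _ _ (hInv''.2.2 n w hdn'') hval
                  subst hw
                  refine ⟨GInv_rewrite gl s0 d'' hInv'' hdn'' hval,
                    PySem.Dict.get?_insert_self .., ?_⟩
                  intro k u hk
                  by_cases hkn : k = n
                  · subst hkn
                    rw [PySem.Dict.get?_insert_self]
                    have := hMono'' k u hk
                    rw [hdn''] at this
                    exact this
                  · rw [get?_insert_ne' d'' hkn]
                    exact hMono'' k u hk
    refine ⟨hA, ?_⟩
    intro cs
    induction cs with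
    | nil =>
      intro acc d t d' hInv h
      rw [calcAFold] at h
      have := Option.some.inj h
      obtain ⟨rfl, rfl⟩ : acc = t ∧ d = d' := ⟨congrArg Prod.fst this, congrArg Prod.snd this⟩
      exact ⟨hInv, resMono_refl d, rfl⟩
    | cons c cs ihcs =>
      intro acc d t d' hInv h
      rw [calcAFold] at h
      split at h
      · cases h
      · next vc d1 hc =>
        obtain ⟨hInv1, hres1, hMono1⟩ := hA c d vc d1 hInv hc
        obtain ⟨hInv', hMono', hosum⟩ := ihcs (acc + vc) d1 t d' hInv1 h
        refine ⟨hInv', resMono_trans hMono1 hMono', ?_⟩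
        have hcres : PySem.Dict.get? d' c = some (some vc) := hMono' c vc hres1
        rw [osum_cons_some (hInv'.2.2 c vc hcres)]
        exact hosum


-- ---- port A computes pv whenever pv is defined (completeness: enough fuel ⇒ A returns pv)

theorem A_complete (gl : List (Int × List Int)) (s0 : PySem.Dict Int (Option Int)) : ∀ f : Nat,
    (∀ n d v, GInv gl s0 d → pv (PySem.Dict.mk gl) s0 f n = some v →
       ∃ d', calcA (PySem.Dict.mk gl) f n d = some (v, d') ∧ GInv gl s0 d' ∧ ResMono d d' ∧
         PySem.Dict.get? d' n = some (some v)) ∧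
    (∀ cs acc d t, GInv gl s0 d → osum (pv (PySem.Dict.mk gl) s0 f) cs (some acc) = some t →
       ∃ d', calcAFold (PySem.Dict.mk gl) f cs acc d = some (t, d') ∧ GInv gl s0 d' ∧ ResMono d d' ∧
         (∀ c ∈ cs, ∃ w, PySem.Dict.get? d' c = some (some w))) := by
  intro f
  induction f with
  | zero =>
    constructor
    · intro n d v _ h; simp [pv] at h
    · intro cs acc d t hInv h
      cases cs with
      | nil =>
        rw [osum_nil] at h
        exact ⟨d, by rw [calcAFold, Option.some.inj h], hInv, resMono_refl d,
          by intro c hc; cases hc⟩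
      | cons c cs => rw [osum_cons_none (by simp [pv])] at h; cases h
  | succ f ih =>
    have hA : ∀ n d v, GInv gl s0 d → pv (PySem.Dict.mk gl) s0 (f+1) n = some v →
        ∃ d', calcA (PySem.Dict.mk gl) (f+1) n d = some (v, d') ∧ GInv gl s0 d' ∧ ResMono d d' ∧
          PySem.Dict.get? d' n = some (some v) := by
      intro n d v hInv h
      rw [pv] at h
      split at h
      · cases h
      · -- s0 memo hit : pv value is the original entry
        next v0 hs0n =>
        obtain rfl : v0 = v := Option.some.inj h
        cases hdn : PySem.Dict.get? d n with
        | none =>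
          exfalso
          have := (hInv.2.1 n).mp hdn
          rw [this] at hs0n; cases hs0n
        | some o =>
          cases o with
          | none =>
            exfalso
            have := hInv.1 n hdn
            rw [this] at hs0n; simp at hs0n
          | some w =>
            have hpvd : pv (PySem.Dict.mk gl) s0 (rc gl d + 1) n = some w := hInv.2.2 n w hdn
            have hpvn : pv (PySem.Dict.mk gl) s0 (rc gl d + 1) n = some v0 := by
              rw [pv]; simp [hs0n]
            obtain rfl : w = v0 := by rw [hpvd] at hpvn; exact Option.some.inj hpvn
            exact ⟨d, by simp [calcA, hdn], hInv, resMono_refl d, hdn⟩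
      · next hs0n =>
        split at h
        · cases h
        · next ch hgn =>
          have hmem : n ∈ gl.map Prod.fst := mem_keys_of_get? gl n ch hgn
          cases hdn : PySem.Dict.get? d n with
          | none =>
            exfalso
            have := (hInv.2.1 n).mp hdn
            rw [this] at hs0n; cases hs0n
          | some o =>
            cases o with
            | some w =>
              have hv : pv (PySem.Dict.mk gl) s0 (f+1) n = some v := by
                rw [pv]; simp only [hs0n, hgn]; exact h
              obtain rfl : w = v := pv_det _ _ (hInv.2.2 n w hdn) hv
              exact ⟨d, by simp [calcA, hdn], hInv, resMono_refl d, hdn⟩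
            | none =>
              by_cases he : ch.isEmpty
              · rw [if_pos he] at h
                obtain rfl : (1:Int) = v := Option.some.inj h
                have hval : pv (PySem.Dict.mk gl) s0 (rc gl d + 2) n = some 1 := by
                  simp [pv, hs0n, hgn, he]
                refine ⟨PySem.Dict.insert d n (some 1), ?_,
                  GInv_write gl s0 d hInv hdn hmem hval,
                  resMono_insert d 1 (fun w' hw' => by rw [hdn] at hw'; cases hw'),
                  PySem.Dict.get?_insert_self ..⟩
                simp [calcA, hdn, hgn, he]
              · rw [if_neg he] at h
                obtain ⟨d'', hfold, hInv'', hMono'', hchres⟩ := ih.2 ch 0 d v hInv h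
                have hosum' :
                    osum (pv (PySem.Dict.mk gl) s0 (rc gl d'' + 1)) ch (some 0) = some v := by
                  refine osum_mono ch 0 v ?_ h
                  intro c hc w hw
                  obtain ⟨wc, hwc⟩ := hchres c hc
                  have h1 : pv (PySem.Dict.mk gl) s0 (rc gl d'' + 1) c = some wc :=
                    hInv''.2.2 c wc hwc
                  obtain rfl : w = wc := pv_det _ _ hw h1
                  exact h1
                have hval : pv (PySem.Dict.mk gl) s0 (rc gl d'' + 2) n = some v := by
                  simp only [pv, hs0n, hgn, if_neg he]
                  exact hosum'
                cases hdn'' : PySem.Dict.get? d'' n with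
                | none =>
                  exfalso
                  have := (hInv''.2.1 n).mp hdn''
                  rw [this] at hs0n; cases hs0n
                | some o'' =>
                  cases o'' with
                  | none =>
                    refine ⟨PySem.Dict.insert d'' n (some v), ?_,
                      GInv_write gl s0 d'' hInv'' hdn'' hmem hval,
                      resMono_trans hMono'' (resMono_insert d'' v
                        (fun w' hw' => by rw [hdn''] at hw'; cases hw')),
                      PySem.Dict.get?_insert_self ..⟩
                    simp [calcA, hdn, hgn, he, hfold]
                  | some w =>
                    obtain rfl : w = v := pv_det _ _ (hInv''.2.2 n w hdn'') hval
                    refine ⟨PySem.Dict.insert d'' n (some w), ?_,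
                      GInv_rewrite gl s0 d'' hInv'' hdn'' hval, ?_,
                      PySem.Dict.get?_insert_self ..⟩
                    · simp [calcA, hdn, hgn, he, hfold]
                    · intro k u hk
                      by_cases hkn : k = n
                      · subst hkn
                        rw [PySem.Dict.get?_insert_self]
                        have := hMono'' k u hk
                        rw [hdn''] at this
                        exact this
                      · rw [get?_insert_ne' d'' hkn]
                        exact hMono'' k u hk
    refine ⟨hA, ?_⟩
    intro cs
    induction cs with
    | nil =>
      intro acc d t hInv h
      rw [osum_nil] at h
      exact ⟨d, by rw [calcAFold, Option.some.inj h], hInv, resMono_refl d,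
        by intro c hc; cases hc⟩
    | cons c cs ihcs =>
      intro acc d t hInv h
      cases hc : pv (PySem.Dict.mk gl) s0 (f+1) c with
      | none => rw [osum_cons_none hc] at h; cases h
      | some vc =>
        rw [osum_cons_some hc] at h
        obtain ⟨d1, hcall, hInv1, hMono1, hres1⟩ := hA c d vc hInv hc
        obtain ⟨d', hfold, hInv', hMono', hchres⟩ := ihcs (acc + vc) d1 t hInv1 h
        refine ⟨d', ?_, hInv', resMono_trans hMono1 hMono', ?_⟩
        · simp [calcAFold, hcall, hfold]
        · intro c' hc'
          rcases List.mem_cons.mp hc' with rfl | hmem'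
          · exact ⟨vc, hMono' c' vc hres1⟩
          · exact hchres c' hmem'


-- ---- port B: one dpStep either leaves the dict alone or writes one pv-correct value

theorem pv_step_val (gl : List (Int × List Int)) (s0 d : PySem.Dict Int (Option Int))
    (hInv : GInv gl s0 d) {n : Int} {ch : List Int}
    (hs0n : PySem.Dict.get? s0 n = some none)
    (hgn : PySem.Dict.get? (PySem.Dict.mk gl) n = some ch)
    (hres : ∀ c ∈ ch, ∃ w, PySem.Dict.get? d c = some (some w)) :
    ((ch.map (fun c => (PySem.Dict.get? d c).join)).all Option.isSome = true) ∧
    pv (PySem.Dict.mk gl) s0 (rc gl d + 2) n =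
      some (if ch.isEmpty then 1
            else (ch.map (fun c => (PySem.Dict.get? d c).join)).foldl (fun a v => a + v.getD 0) 0) := by
  have hjoin : ∀ c ∈ ch, (PySem.Dict.get? d c).join = some (((PySem.Dict.get? d c).join).getD 0) := by
    intro c hc
    obtain ⟨w, hw⟩ := hres c hc
    simp [hw]
  constructor
  · rw [List.all_eq_true]
    intro x hx
    obtain ⟨c, hc, rfl⟩ := List.mem_map.mp hx
    rw [hjoin c hc]; rfl
  · by_cases he : ch.isEmpty
    · simp [pv, hs0n, hgn, he]
    · rw [if_neg he]
      have hosum : osum (pv (PySem.Dict.mk gl) s0 (rc gl d + 1)) ch (some 0) =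
          some (ch.foldl (fun a c => a + ((PySem.Dict.get? d c).join).getD 0) 0) := by
        refine osum_of_vals ch 0 ?_
        intro c hc
        obtain ⟨w, hw⟩ := hres c hc
        have : ((PySem.Dict.get? d c).join).getD 0 = w := by simp [hw]
        rw [this]
        exact hInv.2.2 c w hw
      rw [pv]
      simp only [hs0n, hgn, if_neg he]
      rw [hosum, List.foldl_map]

theorem dpStep_eq (st : PySem.Dict Int (Option Int) × Bool) (p : Int × List Int) :
    dpStep st p =
      match PySem.Dict.get? st.1 p.1 with
      | some none =>
        if (p.2.map (fun c => (PySem.Dict.get? st.1 c).join)).all Option.isSome then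
          (PySem.Dict.insert st.1 p.1
            (some (if p.2.isEmpty then 1
                   else (p.2.map (fun c => (PySem.Dict.get? st.1 c).join)).foldl
                          (fun a v => a + v.getD 0) 0)), true)
        else st
      | _ => st := rfl

theorem dpStep_mono (st : PySem.Dict Int (Option Int) × Bool) (p : Int × List Int) :
    ResMono st.1 (dpStep st p).1 := by
  rw [dpStep_eq]
  cases hdp : PySem.Dict.get? st.1 p.1 with
  | none => exact resMono_refl st.1
  | some o =>
    cases o with
    | some w => exact resMono_refl st.1
    | none =>
      by_cases hall : (p.2.map (fun c => (PySem.Dict.get? st.1 c).join)).all Option.isSome = true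
      · rw [if_pos hall]
        exact resMono_insert st.1 _ (fun w' hw' => by rw [hdp] at hw'; cases hw')
      · rw [if_neg hall]
        exact resMono_refl st.1

theorem dpFold_mono : ∀ (l : List (Int × List Int)) (st : PySem.Dict Int (Option Int) × Bool),
    ResMono st.1 ((l.foldl dpStep st).1) := by
  intro l
  induction l with
  | nil => intro st; exact resMono_refl st.1
  | cons p t ih => intro st; exact resMono_trans (dpStep_mono st p) (ih (dpStep st p))

theorem dpStep_sound (gl : List (Int × List Int)) (s0 : PySem.Dict Int (Option Int))
    (hnd : (gl.map Prod.fst).Nodup) (st : PySem.Dict Int (Option Int) × Bool)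
    (p : Int × List Int) (hp : p ∈ gl) (hInv : GInv gl s0 st.1) :
    GInv gl s0 ((dpStep st p).1) := by
  rw [dpStep_eq]
  cases hdp : PySem.Dict.get? st.1 p.1 with
  | none => exact hInv
  | some o =>
    cases o with
    | some w => exact hInv
    | none =>
      by_cases hall : (p.2.map (fun c => (PySem.Dict.get? st.1 c).join)).all Option.isSome = true
      · rw [if_pos hall]
        have hs0n : PySem.Dict.get? s0 p.1 = some none := hInv.1 p.1 hdp
        have hgn : PySem.Dict.get? (PySem.Dict.mk gl) p.1 = some p.2 :=
          get?_of_pair_nodup gl hnd p.1 p.2 hp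
        have hres : ∀ c ∈ p.2, ∃ w, PySem.Dict.get? st.1 c = some (some w) := by
          intro c hc
          have hx : ((PySem.Dict.get? st.1 c).join).isSome = true := by
            rw [List.all_eq_true] at hall
            exact hall _ (List.mem_map.mpr ⟨c, hc, rfl⟩)
          obtain ⟨w, hw⟩ := Option.isSome_iff_exists.mp hx
          exact ⟨w, by rwa [Option.join_eq_some_iff] at hw⟩
        obtain ⟨-, hval⟩ := pv_step_val gl s0 st.1 hInv hs0n hgn hres
        exact GInv_write gl s0 st.1 hInv hdp (List.mem_map.mpr ⟨p, hp, rfl⟩) hval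
      · rw [if_neg hall]
        exact hInv

theorem dpFold_sound (gl : List (Int × List Int)) (s0 : PySem.Dict Int (Option Int))
    (hnd : (gl.map Prod.fst).Nodup) :
    ∀ (l : List (Int × List Int)) (st : PySem.Dict Int (Option Int) × Bool),
    (∀ p ∈ l, p ∈ gl) → GInv gl s0 st.1 → GInv gl s0 ((l.foldl dpStep st).1) := by
  intro l
  induction l with
  | nil => intro st _ h; exact h
  | cons p t ih =>
    intro st hsub hInv
    exact ih (dpStep st p) (fun q hq => hsub q (by simp [hq]))
      (dpStep_sound gl s0 hnd st p (hsub p (by simp)) hInv)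

-- ---- the `changed` flag: a round that reports no change did not touch the dict

theorem dpStep_flag_false {st : PySem.Dict Int (Option Int) × Bool} {p : Int × List Int}
    (h : (dpStep st p).2 = false) : dpStep st p = st := by
  rw [dpStep_eq] at h ⊢
  cases hdp : PySem.Dict.get? st.1 p.1 with
  | none => rfl
  | some o =>
    cases o with
    | some w => rfl
    | none =>
      rw [hdp] at h
      by_cases hall : (p.2.map (fun c => (PySem.Dict.get? st.1 c).join)).all Option.isSome = true
      · rw [if_pos hall] at h; cases h
      · rw [if_neg hall]

theorem dpStep_flag_true {st : PySem.Dict Int (Option Int) × Bool} {p : Int × List Int}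
    (h : st.2 = true) : (dpStep st p).2 = true := by
  rw [dpStep_eq]
  cases hdp : PySem.Dict.get? st.1 p.1 with
  | none => exact h
  | some o =>
    cases o with
    | some w => exact h
    | none =>
      by_cases hall : (p.2.map (fun c => (PySem.Dict.get? st.1 c).join)).all Option.isSome = true
      · rw [if_pos hall]
      · rw [if_neg hall]; exact h

theorem dpFold_flag_true : ∀ (l : List (Int × List Int)) (st : PySem.Dict Int (Option Int) × Bool),
    st.2 = true → (l.foldl dpStep st).2 = true := by
  intro l
  induction l with
  | nil => intro st h; exact h
  | cons p t ih => intro st h; exact ih (dpStep st p) (dpStep_flag_true h)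

theorem dpFold_flag_false : ∀ (l : List (Int × List Int)) (st : PySem.Dict Int (Option Int) × Bool),
    (l.foldl dpStep st).2 = false → l.foldl dpStep st = st := by
  intro l
  induction l with
  | nil => intro st _; rfl
  | cons p t ih =>
    intro st h
    rw [List.foldl_cons] at h ⊢
    have hflag : (dpStep st p).2 = false := by
      cases hb : (dpStep st p).2 with
      | false => rfl
      | true => rw [dpFold_flag_true t _ hb] at h; cases h
    rw [dpStep_flag_false hflag] at h ⊢
    exact ih st h

theorem dpRound_nochange (gl : List (Int × List Int)) (d : PySem.Dict Int (Option Int))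
    (h : (dpRound gl d).2 = false) : (dpRound gl d).1 = d := by
  unfold dpRound at h ⊢
  rw [dpFold_flag_false gl (d, false) h]

-- ---- pure round iteration, and the early-exit loop computes it

def iterR (gl : List (Int × List Int)) : Nat → PySem.Dict Int (Option Int) → PySem.Dict Int (Option Int)
  | 0, d => d
  | r+1, d => iterR gl r ((dpRound gl d).1)

theorem iterR_fix (gl : List (Int × List Int)) (d : PySem.Dict Int (Option Int))
    (h : (dpRound gl d).2 = false) : ∀ r, iterR gl r d = d := by
  intro r
  induction r with
  | zero => rfl
  | succ r ih => rw [iterR, dpRound_nochange gl d h]; exact ih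

theorem loop_eq_iter (gl : List (Int × List Int)) : ∀ (r : Nat) (d : PySem.Dict Int (Option Int)),
    dpLoop gl r d = iterR gl r d := by
  intro r
  induction r with
  | zero => intro d; rfl
  | succ r ih =>
    intro d
    rw [dpLoop, iterR]
    cases hR : dpRound gl d with
    | mk d' b =>
      cases b with
      | true => simp only []; rw [ih d']
      | false =>
        simp only []
        have hflag : (dpRound gl d).2 = false := by rw [hR]
        have hd' : d' = d := by have := dpRound_nochange gl d hflag; rw [hR] at this; exact this
        subst hd'
        exact (iterR_fix gl d' hflag r).symm

theorem iterR_back (gl : List (Int × List Int)) : ∀ (r : Nat) (d : PySem.Dict Int (Option Int)),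
    iterR gl (r+1) d = (dpRound gl (iterR gl r d)).1 := by
  intro r
  induction r with
  | zero => intro d; rfl
  | succ r ih => intro d; rw [iterR, ih ((dpRound gl d).1), iterR]

theorem iterR_sound (gl : List (Int × List Int)) (s0 : PySem.Dict Int (Option Int))
    (hnd : (gl.map Prod.fst).Nodup) : ∀ (r : Nat) (d : PySem.Dict Int (Option Int)),
    GInv gl s0 d → GInv gl s0 (iterR gl r d) := by
  intro r
  induction r with
  | zero => intro d h; exact h
  | succ r ih =>
    intro d h
    rw [iterR]
    exact ih _ (dpFold_sound gl s0 hnd gl (d, false) (fun p hp => hp) h)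

theorem iterR_mono (gl : List (Int × List Int)) : ∀ (r : Nat) (d : PySem.Dict Int (Option Int)),
    ResMono d (iterR gl r d) := by
  intro r
  induction r with
  | zero => intro d; exact resMono_refl d
  | succ r ih =>
    intro d
    rw [iterR]
    exact resMono_trans (dpFold_mono gl (d, false)) (ih _)

-- ---- progress: once every child is resolved, the round containing n's pair resolves n

theorem dpFold_resolves (gl : List (Int × List Int)) (s0 : PySem.Dict Int (Option Int))
    (hnd : (gl.map Prod.fst).Nodup) {n : Int} {ch : List Int} {F : Nat} {v : Int}
    (hs0n : PySem.Dict.get? s0 n = some none)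
    (hgn : PySem.Dict.get? (PySem.Dict.mk gl) n = some ch)
    (hpv : pv (PySem.Dict.mk gl) s0 F n = some v) :
    ∀ (l : List (Int × List Int)) (st : PySem.Dict Int (Option Int) × Bool),
    (∀ p ∈ l, p ∈ gl) → (n, ch) ∈ l → GInv gl s0 st.1 →
    (∀ c ∈ ch, ∃ w, PySem.Dict.get? st.1 c = some (some w)) →
    PySem.Dict.get? ((l.foldl dpStep st).1) n = some (some v) := by
  intro l
  induction l with
  | nil => intro st _ hmem; cases hmem
  | cons p t ih =>
    intro st hsub hmem hInv hres
    rw [List.foldl_cons]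
    by_cases hp1 : p.1 = n
    · have hpeq : p = (n, ch) := by
        have h1 : PySem.Dict.get? (PySem.Dict.mk gl) p.1 = some p.2 :=
          get?_of_pair_nodup gl hnd p.1 p.2 (hsub p (by simp))
        rw [hp1, hgn] at h1
        have : ch = p.2 := Option.some.inj h1
        rw [show p = (p.1, p.2) from rfl, hp1, ← this]
      cases hdp : PySem.Dict.get? st.1 n with
      | none =>
        exfalso
        have := (hInv.2.1 n).mp hdp
        rw [this] at hs0n; cases hs0n
      | some o =>
        cases o with
        | some w =>
          have hwv : w = v := pv_det _ _ (hInv.2.2 n w hdp) hpv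
          have hstep : dpStep st p = st := by
            rw [hpeq, dpStep_eq]
            simp [hdp]
          rw [hstep, ← hwv]
          exact dpFold_mono t st n w hdp
        | none =>
          obtain ⟨hall, hval⟩ := pv_step_val gl s0 st.1 hInv hs0n hgn hres
          have hw : (if ch.isEmpty then (1:Int)
              else (ch.map (fun c => (PySem.Dict.get? st.1 c).join)).foldl (fun a v => a + v.getD 0) 0) = v :=
            pv_det _ _ hval hpv
          have hstep : dpStep st p = (PySem.Dict.insert st.1 n (some v), true) := by
            rw [hpeq, dpStep_eq]
            simp only [hdp, hall, if_true, hw]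
          rw [hstep]
          exact dpFold_mono t _ n v (by rw [PySem.Dict.get?_insert_self])
    · have hInv' : GInv gl s0 ((dpStep st p).1) :=
        dpStep_sound gl s0 hnd st p (hsub p (by simp)) hInv
      have hres' : ∀ c ∈ ch, ∃ w, PySem.Dict.get? ((dpStep st p).1) c = some (some w) := by
        intro c hc
        obtain ⟨w, hw⟩ := hres c hc
        exact ⟨w, dpStep_mono st p c w hw⟩
      have hmem' : (n, ch) ∈ t := by
        rcases List.mem_cons.mp hmem with h | h
        · exact absurd (congrArg Prod.fst h.symm) hp1
        · exact h
      exact ih (dpStep st p) (fun q hq => hsub q (by simp [hq])) hmem' hInv' hres'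

theorem B_complete (gl : List (Int × List Int)) (s0 : PySem.Dict Int (Option Int))
    (hnd : (gl.map Prod.fst).Nodup) : ∀ (f : Nat) (n v : Int),
    pv (PySem.Dict.mk gl) s0 f n = some v →
    PySem.Dict.get? (iterR gl f s0) n = some (some v) := by
  intro f
  induction f with
  | zero => intro n v h; simp [pv] at h
  | succ f ih =>
    intro n v h
    have hGI : GInv gl s0 (iterR gl f s0) := iterR_sound gl s0 hnd f s0 (GInv_init gl s0)
    rw [pv] at h
    split at h
    · cases h
    · next v0 hs0n =>
      obtain rfl : v0 = v := Option.some.inj h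
      exact iterR_mono gl (f+1) s0 n v0 hs0n
    · next hs0n =>
      split at h
      · cases h
      · next ch hgn =>
        have hpv : pv (PySem.Dict.mk gl) s0 (f+1) n = some v := by
          rw [pv]; simp only [hs0n, hgn]; exact h
        have hres : ∀ c ∈ ch, ∃ w, PySem.Dict.get? (iterR gl f s0) c = some (some w) := by
          by_cases he : ch.isEmpty
          · intro c hc
            rw [List.isEmpty_iff.mp he] at hc
            cases hc
          · rw [if_neg he] at h
            intro c hc
            obtain ⟨vc, hvc⟩ := osum_elim ch 0 v h c hc
            exact ⟨vc, ih c vc hvc⟩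
        rw [iterR_back]
        exact dpFold_resolves gl s0 hnd hs0n hgn hpv gl (iterR gl f s0, false)
          (fun p hp => hp) (get?_mk_mem gl n ch hgn) hGI hres

-- ===== VERDICT (by name: the statement is the Claim_ definition above) =====
theorem calc_salary_spec : Claim_equal_calc_salary := by
  unfold Claim_equal_calc_salary
  intro graph node salaries _ hPre
  unfold Spec_calc_salary
  obtain ⟨hnd, -⟩ := hPre
  have hInv0 : GInv graph (PySem.Dict.mk salaries) (PySem.Dict.mk salaries) :=
    GInv_init graph (PySem.Dict.mk salaries)
  unfold calc_salary calc_salary_alt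
  rw [loop_eq_iter]
  cases hp : pv (PySem.Dict.mk graph) (PySem.Dict.mk salaries) (graph.length + 1) node with
  | some v =>
    obtain ⟨d', hcall, -, -, -⟩ :=
      (A_complete graph (PySem.Dict.mk salaries) (graph.length + 1)).1 node
        (PySem.Dict.mk salaries) v hInv0 hp
    have hres := B_complete graph (PySem.Dict.mk salaries) hnd (graph.length + 1) node v hp
    rw [hcall, hres]
  | none =>
    have hBnot : ∀ v : Int,
        PySem.Dict.get? (iterR graph (graph.length + 1) (PySem.Dict.mk salaries)) node ≠
          some (some v) := by
      intro v hres
      have hGI : GInv graph (PySem.Dict.mk salaries)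
          (iterR graph (graph.length + 1) (PySem.Dict.mk salaries)) :=
        iterR_sound graph (PySem.Dict.mk salaries) hnd (graph.length + 1)
          (PySem.Dict.mk salaries) hInv0
      have h1 := hGI.2.2 node v hres
      have h2 := pv_mono (PySem.Dict.mk graph) (PySem.Dict.mk salaries) _ (graph.length + 1)
        (by have := rc_le graph (iterR graph (graph.length + 1) (PySem.Dict.mk salaries)); omega)
        node v h1
      rw [hp] at h2; cases h2
    have hAnone : calcA (PySem.Dict.mk graph) (graph.length + 1) node (PySem.Dict.mk salaries) = none := by
      cases hA : calcA (PySem.Dict.mk graph) (graph.length + 1) node (PySem.Dict.mk salaries) with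
      | none => rfl
      | some r =>
        exfalso
        obtain ⟨v, d'⟩ := r
        obtain ⟨hInv', hres', -⟩ :=
          (A_sound graph (PySem.Dict.mk salaries) (graph.length + 1)).1 node
            (PySem.Dict.mk salaries) v d' hInv0 hA
        have h1 := hInv'.2.2 node v hres'
        have h2 := pv_mono (PySem.Dict.mk graph) (PySem.Dict.mk salaries) _ (graph.length + 1)
          (by have := rc_le graph d'; omega) node v h1
        rw [hp] at h2; cases h2
    rw [hAnone]
    cases hB : PySem.Dict.get? (iterR graph (graph.length + 1) (PySem.Dict.mk salaries)) node with
    | none => rfl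
    | some o =>
      cases o with
      | none => rfl
      | some v => exact absurd hB (hBnot v)
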